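-- pv_equiv track=rewrite | github.com/Barnard-PL-Labs/jark | Experiments/LarkProcessor/lark_processor.py | _build_allowed_first_chars
-- ===== SOURCE A (Python) =====
-- def _build_allowed_first_chars(expected: set[str]) -> set[str]:
--     """Map expected terminals to allowed first characters of the next token text.
--
--     This is a conservative projection of grammar terminals to character-level
--     constraints suitable for piecewise token filtering.
--     """
--     allowed: set[str] = set()
--
--     # Whitespace is ignored by the grammar; allow it to pass through.
--     allowed.update([" ", "\t", "\n", "\r"])
--
--     # Arithmetic literals
--     literal_map = ["+", "-", "*", "/", "(", ")"]
--     for lit in literal_map: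
--         if (lit in expected) or (f'"{lit}"' in expected):
--             allowed.add(lit)
--
--     # Numbers: accept digits and dot as starters
--     if any(name in expected for name in ["NUMBER", "DEC_NUMBER", "SIGNED_NUMBER"]):
--         allowed.update(list("0123456789."))
--
--     # Handle LPAR (left parenthesis)
--     if "LPAR" in expected:
--         allowed.add("(")
--
--     return allowed
-- ===== SOURCE B (Python) =====
-- def _build_allowed_first_chars(expected: set[str]) -> set[str]:
--     """One pass over `expected`: classify each terminal, then assemble the set."""
--     LITS = "+-*/()"
--     NUM_NAMES = ("NUMBER", "DEC_NUMBER", "SIGNED_NUMBER")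
--     seen = set()
--     num = False
--     lpar = False
--     for s in expected:
--         t = s[1:-1] if len(s) == 3 and s[0] == '"' and s[2] == '"' else s
--         if len(t) == 1 and t in LITS:
--             seen.add(t)
--         if s in NUM_NAMES:
--             num = True
--         elif s == "LPAR":
--             lpar = True
--     allowed = set(" \t\n\r")
--     allowed.update(c for c in LITS if c in seen)
--     if num:
--         allowed.update("0123456789.")
--     if lpar:
--         allowed.add("(")
--     return allowed
-- ===== Notes on version B (the rewrite author's own statement) =====
-- stated objective: alternative
-- what changed: Inverts the traversal: instead of membership-testing a fixed literal list (and quoted forms) against the set, B makes one pass over `expected`, classifying each terminal (bare/quoted arithmetic literal, NUMBER-family name, LPAR) into flags, then assembles the result set from the flags.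
import Mathlib
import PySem

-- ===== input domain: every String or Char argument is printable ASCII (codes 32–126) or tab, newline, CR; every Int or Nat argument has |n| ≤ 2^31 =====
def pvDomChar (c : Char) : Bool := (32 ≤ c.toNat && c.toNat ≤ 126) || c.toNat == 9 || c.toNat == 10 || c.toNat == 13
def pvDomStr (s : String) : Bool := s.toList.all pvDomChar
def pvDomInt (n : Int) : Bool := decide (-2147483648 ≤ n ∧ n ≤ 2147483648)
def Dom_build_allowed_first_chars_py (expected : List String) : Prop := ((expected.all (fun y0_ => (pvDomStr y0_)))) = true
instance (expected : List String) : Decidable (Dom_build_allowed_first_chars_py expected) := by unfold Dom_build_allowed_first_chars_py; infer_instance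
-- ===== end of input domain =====

-- B inverts the traversal: one pass over `expected` classifying each terminal into flags, then the
-- result set is assembled from the flags — instead of A's membership tests over a fixed literal
-- list; alternative decomposition, no speed claim.

-- ===== PORT A =====
-- The f-string f'"{lit}"' is written out per literal as the second pair component.
def build_allowed_first_chars_py (expected : List String) : List String :=
  let allowed : PySem.Set String := PySem.Set.update PySem.Set.empty [" ", "\t", "\n", "\r"]
  let allowed := [("+", "\"+\""), ("-", "\"-\""), ("*", "\"*\""), ("/", "\"/\""),
                  ("(", "\"(\""), (")", "\")\"")].foldl
      (fun acc p => if expected.contains p.1 || expected.contains p.2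
                    then PySem.Set.add acc p.1 else acc) allowed
  let allowed := if ["NUMBER", "DEC_NUMBER", "SIGNED_NUMBER"].any (fun name => expected.contains name)
      then PySem.Set.update allowed ["0","1","2","3","4","5","6","7","8","9","."] else allowed
  if expected.contains "LPAR" then PySem.Set.add allowed "(" else allowed

-- ===== PORT B =====
def altLits : List Char := ['+', '-', '*', '/', '(', ')']     -- LITS = "+-*/()"
def altNumNames : List String := ["NUMBER", "DEC_NUMBER", "SIGNED_NUMBER"]

-- t = s[1:-1] if len(s) == 3 and s[0] == '"' and s[2] == '"' else s
def altStrip (s : String) : List Char :=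
  match s.toList with
  | [a, b, d] => if a == '"' && d == '"' then [b] else [a, b, d]
  | cs => cs

-- the loop body: collect the seen literal chars and the num/lpar flags
def altStep (st : PySem.Set Char × Bool × Bool) (s : String) : PySem.Set Char × Bool × Bool :=
  let seen := match altStrip s with
    | [c] => if altLits.contains c then PySem.Set.add st.1 c else st.1
    | _ => st.1
  let nl : Bool × Bool :=
    if altNumNames.contains s then (true, st.2.2)
    else if s == "LPAR" then (st.2.1, true)
    else st.2
  (seen, nl.1, nl.2)

def build_allowed_first_chars_py_alt (expected : List String) : List String :=
  let st := expected.foldl altStep (PySem.Set.empty, false, false)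
  let allowed : PySem.Set String := PySem.Set.ofList [" ", "\t", "\n", "\r"]
  let allowed := PySem.Set.update allowed
      ((altLits.filter (fun c => PySem.Set.contains st.1 c)).map (fun c => String.ofList [c]))
  let allowed := if st.2.1 then PySem.Set.update allowed ["0","1","2","3","4","5","6","7","8","9","."]
                 else allowed
  if st.2.2 then PySem.Set.add allowed "(" else allowed

-- ===== PRECONDITION & SPEC =====
def Spec_build_allowed_first_chars_py (expected : List String) (out : List String) : Prop := out = build_allowed_first_chars_py_alt expected
instance (expected : List String) (out : List String) : Decidable (Spec_build_allowed_first_chars_py expected out) := by unfold Spec_build_allowed_first_chars_py; infer_instance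

-- ===== CLAIM (what is proved, stated in full; the proofs are below) =====
def Claim_equal_build_allowed_first_chars_py : Prop := ∀ (expected : List String), Dom_build_allowed_first_chars_py expected → Spec_build_allowed_first_chars_py expected (build_allowed_first_chars_py expected)

-- ===== LEMMAS AND PROOFS =====

-- s triggers the literal character c (bare or quoted)
def hB (s : String) (c : Char) : Bool := (s.toList == [c]) || (s.toList == ['"', c, '"'])

theorem contains_add_bool (t : PySem.Set Char) (a c : Char) :
    PySem.Set.contains (PySem.Set.add t a) c = (PySem.Set.contains t c || (a == c)) := by
  rw [Bool.eq_iff_iff]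
  simp only [PySem.Set.contains, List.contains_iff_mem, PySem.Set.mem_add, Bool.or_eq_true,
    decide_eq_true_eq, beq_iff_eq]
  constructor
  · rintro (h | rfl)
    · exact Or.inl (by simpa using h)
    · exact Or.inr rfl
  · rintro (h | rfl)
    · exact Or.inl (by simpa using h)
    · exact Or.inr rfl

theorem altStep_contains (st : PySem.Set Char × Bool × Bool) (s : String) (c : Char)
    (hc : altLits.contains c = true) :
    PySem.Set.contains (altStep st s).1 c = (PySem.Set.contains st.1 c || hB s c) := by
  have hmem := List.contains_iff_mem.mp hc
  unfold altStep hB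
  cases hcs : s.toList with
  | nil => simp [altStrip, hcs]
  | cons a tl =>
    cases tl with
    | nil =>
      simp only [altStrip, hcs]
      by_cases ha : a ∈ altLits
      · simp only [List.contains_iff_mem, ha, if_true, decide_true, contains_add_bool]
        rw [Bool.eq_iff_iff]
        simp only [Bool.or_eq_true, beq_iff_eq, List.cons.injEq, and_true, List.cons_ne_nil,
          and_false, or_false, List.nil_eq, reduceCtorEq, false_and]
        try tauto
      · have hac : (a == c) = false := by
          cases h : a == c
          · rfl
          · exact absurd (beq_iff_eq.mp h ▸ hmem) ha
        simp [List.contains_iff_mem, ha, hac]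
    | cons b tl2 =>
      cases tl2 with
      | nil => simp [altStrip, hcs]
      | cons d tl3 =>
        cases tl3 with
        | nil =>
          simp only [altStrip, hcs]
          by_cases hq : (a == '"' && d == '"') = true
          · obtain ⟨rfl, rfl⟩ : a = '"' ∧ d = '"' := by
              simp [beq_iff_eq] at hq; exact hq
            simp only [hq, if_true]
            by_cases hb : b ∈ altLits
            · simp only [List.contains_iff_mem, hb, if_true, decide_true, contains_add_bool]
              rw [Bool.eq_iff_iff]
              simp only [Bool.or_eq_true, beq_iff_eq, List.cons.injEq, and_true, true_and,
                reduceCtorEq, and_false, false_or, or_false, false_and]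
              try tauto
            · have hbc : (b == c) = false := by
                cases h : b == c
                · rfl
                · exact absurd (beq_iff_eq.mp h ▸ hmem) hb
              simp [List.contains_iff_mem, hb, hbc]
          · rw [Bool.not_eq_true] at hq
            simp only [hq, if_false]
            have h2 : ([a, b, d] == ['"', c, '"']) = false := by
              cases h : [a, b, d] == ['"', c, '"']
              · rfl
              · have h3 := beq_iff_eq.mp h
                injection h3 with h1 h3'; injection h3' with hmid h3''; injection h3'' with hlast _
                rw [h1, hlast] at hq
                simp at hq
            simp [h2]
        | cons e tl4 => simp [altStrip, hcs]

theorem altStep_num (st : PySem.Set Char × Bool × Bool) (s : String) :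
    (altStep st s).2.1 = (st.2.1 || altNumNames.contains s) := by
  unfold altStep
  cases h : altNumNames.contains s <;> simp [h]
  split <;> simp

theorem altStep_lpar (st : PySem.Set Char × Bool × Bool) (s : String) :
    (altStep st s).2.2 = (st.2.2 || (s == "LPAR")) := by
  unfold altStep
  cases h : altNumNames.contains s
  · simp only [h, Bool.false_eq_true, if_false]
    cases hl : (s == "LPAR") <;> simp [hl]
  · rw [List.contains_iff_mem] at h
    simp only [altNumNames, List.mem_cons, List.not_mem_nil, or_false] at h
    rcases h with rfl | rfl | rfl <;> simp

theorem altFold (xs : List String) (st : PySem.Set Char × Bool × Bool) :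
    (∀ c, altLits.contains c = true →
      PySem.Set.contains (xs.foldl altStep st).1 c
        = (PySem.Set.contains st.1 c || xs.any (fun s => hB s c)))
    ∧ (xs.foldl altStep st).2.1 = (st.2.1 || xs.any (fun s => altNumNames.contains s))
    ∧ (xs.foldl altStep st).2.2 = (st.2.2 || xs.any (fun s => s == "LPAR")) := by
  induction xs generalizing st with
  | nil => simp
  | cons s xs ih =>
    refine ⟨fun c hc => ?_, ?_, ?_⟩
    · simp only [List.foldl_cons, (ih (altStep st s)).1 c hc, altStep_contains st s c hc,
        List.any_cons, Bool.or_assoc]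
    · simp only [List.foldl_cons, (ih (altStep st s)).2.1, altStep_num, List.any_cons,
        Bool.or_assoc]
    · simp only [List.foldl_cons, (ih (altStep st s)).2.2, altStep_lpar, List.any_cons,
        Bool.or_assoc]

theorem any_hB (xs : List String) (c : Char) (lit q : String)
    (hl : lit.toList = [c]) (hq : q.toList = ['"', c, '"']) :
    xs.any (fun s => hB s c) = (xs.contains lit || xs.contains q) := by
  rw [Bool.eq_iff_iff]
  simp only [List.any_eq_true, Bool.or_eq_true, List.contains_iff_mem, hB, beq_iff_eq]
  constructor
  · rintro ⟨s, hs, h | h⟩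
    · exact Or.inl ((String.toList_inj.mp (h.trans hl.symm)).symm ▸ hs)
    · exact Or.inr ((String.toList_inj.mp (h.trans hq.symm)).symm ▸ hs)
  · rintro (h | h)
    · exact ⟨lit, h, Or.inl hl⟩
    · exact ⟨q, h, Or.inr hq⟩

theorem any_swap (xs l : List String) :
    xs.any (fun s => l.contains s) = l.any (fun n => xs.contains n) := by
  rw [Bool.eq_iff_iff]
  simp only [List.any_eq_true, List.contains_iff_mem]
  exact ⟨fun ⟨s, hs, hl⟩ => ⟨s, hl, hs⟩, fun ⟨n, hn, hx⟩ => ⟨n, hx, hn⟩⟩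

theorem any_eq_contains (xs : List String) (a : String) :
    xs.any (fun s => s == a) = xs.contains a := by
  rw [Bool.eq_iff_iff]
  simp only [List.any_eq_true, beq_iff_eq, List.contains_iff_mem]
  exact ⟨fun ⟨s, hs, h⟩ => h ▸ hs, fun h => ⟨a, h, rfl⟩⟩

-- ===== VERDICT (by name: the statement is the Claim_ definition above) =====
theorem build_allowed_first_chars_py_spec : Claim_equal_build_allowed_first_chars_py := by
  intro expected _
  unfold Spec_build_allowed_first_chars_py build_allowed_first_chars_py build_allowed_first_chars_py_alt
  obtain ⟨Hc, Hn, Hl⟩ := altFold expected (PySem.Set.empty, false, false)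
  simp only [altLits, List.filter, List.foldl_cons, List.foldl_nil, List.any_cons, List.any_nil]
  rw [Hc '+' (by decide), Hc '-' (by decide), Hc '*' (by decide), Hc '/' (by decide),
      Hc '(' (by decide), Hc ')' (by decide), Hn, Hl,
      any_swap expected altNumNames, any_eq_contains]
  simp only [altNumNames, List.any_cons, List.any_nil, Bool.or_false, Bool.false_or,
      PySem.Set.contains]
  rw [any_hB expected '+' "+" "\"+\"" (by decide) (by decide),
      any_hB expected '-' "-" "\"-\"" (by decide) (by decide),
      any_hB expected '*' "*" "\"*\"" (by decide) (by decide),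
      any_hB expected '/' "/" "\"/\"" (by decide) (by decide),
      any_hB expected '(' "(" "\"(\"" (by decide) (by decide),
      any_hB expected ')' ")" "\")\"" (by decide) (by decide)]
  generalize (expected.contains "+" || expected.contains "\"+\"") = b1
  generalize (expected.contains "-" || expected.contains "\"-\"") = b2
  generalize (expected.contains "*" || expected.contains "\"*\"") = b3
  generalize (expected.contains "/" || expected.contains "\"/\"") = b4
  generalize (expected.contains "(" || expected.contains "\"(\"") = b5
  generalize (expected.contains ")" || expected.contains "\")\"") = b6
  generalize (expected.contains "NUMBER" || (expected.contains "DEC_NUMBER" || expected.contains "SIGNED_NUMBER")) = b7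
  generalize expected.contains "LPAR" = b8
  revert b1 b2 b3 b4 b5 b6 b7 b8
  decide
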